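-- pv_equiv track=rewrite | github.com/Digital-AI-Finance/ML_Design_Thinking_16 | Week_10/fix_double_backslash.py | fix_inside_texttt
-- ===== SOURCE A (Python) =====
-- def fix_inside_texttt(content):
--     result = []
--     i = 0
--     while i < len(content):
--         # Find next \texttt{
--         start = content.find('\\texttt{', i)
--         if start == -1:
--             # No more texttt blocks
--             result.append(content[i:])
--             break
--
--         # Add everything before \texttt{
--         result.append(content[i:start+8])  # include \texttt{
--
--         # Find matching }
--         brace_count = 1
--         j = start + 8
--         while j < len(content) and brace_count > 0:
--             if content[j] == '{':
--                 brace_count += 1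
--             elif content[j] == '}':
--                 brace_count -= 1
--             j += 1
--
--         # Extract texttt content
--         texttt_content = content[start+8:j-1]
--
--         # Fix \\\\  to \\ in this block
--         fixed_content = texttt_content.replace('\\\\\\\\', '\\\\')
--
--         result.append(fixed_content)
--         result.append('}')
--
--         i = j
--
--     return ''.join(result)
-- ===== SOURCE B (Python) =====
-- def fix_inside_texttt(content):
--     # Single left-to-right scan: copy text outside \texttt{...} blocks verbatim,
--     # buffer block contents (tracking brace depth) and collapse '\\\\' to '\\' in them.
--     out = []
--     buf = []
--     inside = False
--     depth = 0
--     i = 0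
--     n = len(content)
--     while i < n:
--         if not inside:
--             if content.startswith('\\texttt{', i):
--                 out.append('\\texttt{')
--                 inside = True
--                 depth = 1
--                 buf = []
--                 i += 8
--             else:
--                 out.append(content[i])
--                 i += 1
--         else:
--             c = content[i]
--             if c == '{':
--                 depth += 1
--                 buf.append(c)
--             elif c == '}':
--                 depth -= 1
--                 if depth == 0:
--                     out.append(''.join(buf).replace('\\\\\\\\', '\\\\'))
--                     out.append('}')
--                     inside = False
--                 else:
--                     buf.append(c)
--             else:
--                 buf.append(c)
--             i += 1
--     if inside:
--         out.append(''.join(buf).replace('\\\\\\\\', '\\\\'))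
--     return ''.join(out)
-- ===== Notes on version B (the rewrite author's own statement) =====
-- stated objective: alternative
-- what changed: Replaces A's repeated substring search for the opening marker plus a separate index-based brace-counting inner loop with slice extraction by a single left-to-right character scan that maintains an inside/outside state flag, a brace-depth counter and a block buffer.
-- intended difference: On inputs containing an unterminated texttt block (one whose opening brace is never matched before the end of the string), A silently drops the final character of the input and fabricates a spurious closing brace, while B keeps the block's remaining text (with the backslash fix applied) and adds nothing; B's is intended because A corrupts the text. — e.g. on fix_inside_texttt("\\texttt{ab"): A returns "\\texttt{a}", B returns "\\texttt{ab"
import Mathlib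
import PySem

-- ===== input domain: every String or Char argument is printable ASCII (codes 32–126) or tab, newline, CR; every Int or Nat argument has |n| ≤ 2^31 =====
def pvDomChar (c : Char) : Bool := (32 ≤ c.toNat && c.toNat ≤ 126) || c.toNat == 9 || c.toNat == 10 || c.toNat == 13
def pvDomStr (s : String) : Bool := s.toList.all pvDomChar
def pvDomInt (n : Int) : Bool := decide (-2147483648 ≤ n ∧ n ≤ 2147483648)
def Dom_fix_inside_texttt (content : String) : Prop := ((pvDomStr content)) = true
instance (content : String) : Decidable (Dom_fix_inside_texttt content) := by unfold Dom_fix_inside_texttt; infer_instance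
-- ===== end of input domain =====

-- B re-implements A's find/extract loop as a single character scan with an inside/outside
-- state flag and a brace-depth counter (objective: alternative decomposition, same cost);
-- on an unterminated \texttt{ block A drops the input's last character and fabricates '}',
-- B keeps the remaining block text — stated below as the intended difference D_.
-- Both while-loops are ported with an explicit fuel argument that only makes them total;
-- the fuel supplied at the call sites always exceeds the number of loop iterations.

-- ===== PORT A =====
-- the literal '\texttt{'
def pvPat : List Char := "\\texttt{".toList

-- texttt_content.replace('\\\\', '\\')  (four backslashes -> two, at runtime)
def fixQuad (cs : List Char) : List Char :=
  PySem.Chars.replace cs "\\\\\\\\".toList "\\\\".toList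

-- the inner 'while j < len(content) and brace_count > 0' loop; state (j, brace_count)
def aBrace (cs : List Char) : Nat → Nat → Int → Nat × Int
  | 0, j, bc => (j, bc)
  | fuel + 1, j, bc =>
    if j < cs.length ∧ 0 < bc then
      aBrace cs fuel (j + 1)
        (if cs.getD j ' ' = '{' then bc + 1 else if cs.getD j ' ' = '}' then bc - 1 else bc)
    else (j, bc)

-- the outer 'while i < len(content)' loop; pieces are joined on the fly ("".join)
def aLoop (cs : List Char) : Nat → Nat → List Char
  | 0, _ => []
  | fuel + 1, i =>
    if i < cs.length then
      if PySem.Chars.findFrom cs pvPat (i : Int) none = -1 then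
        PySem.List.slice cs (some (i : Int)) none
      else
        PySem.List.slice cs (some (i : Int))
            (some (((PySem.Chars.findFrom cs pvPat (i : Int) none).toNat : Int) + 8)) ++
        fixQuad (PySem.List.slice cs
            (some (((PySem.Chars.findFrom cs pvPat (i : Int) none).toNat : Int) + 8))
            (some (((aBrace cs cs.length ((PySem.Chars.findFrom cs pvPat (i : Int) none).toNat + 8) 1).1 : Int) - 1))) ++
        ['}'] ++
        aLoop cs fuel (aBrace cs cs.length ((PySem.Chars.findFrom cs pvPat (i : Int) none).toNat + 8) 1).1
    else []

def fix_inside_texttt (content : String) : String :=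
  String.ofList (aLoop content.toList (content.toList.length + 1) 0)

-- ===== PORT B =====
-- single left-to-right scan; state = (inside?, depth, block buffer, output) as in Source B;
-- at end of input a still-open block buffer is flushed (fixed) to the output
def bLoop : Nat → List Char → Bool → Int → List Char → List Char → List Char
  | _, [], inside, _, buf, out => if inside then out ++ fixQuad buf else out
  | 0, _ :: _, _, _, _, out => out
  | fuel + 1, c :: rest, inside, depth, buf, out =>
    if inside = false then
      if PySem.Chars.startswith (c :: rest) pvPat then
        bLoop fuel ((c :: rest).drop 8) true 1 [] (out ++ pvPat)
      else
        bLoop fuel rest false depth buf (out ++ [c])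
    else
      if c = '{' then bLoop fuel rest true (depth + 1) (buf ++ [c]) out
      else if c = '}' then
        if depth - 1 = 0 then bLoop fuel rest false (depth - 1) buf (out ++ fixQuad buf ++ ['}'])
        else bLoop fuel rest true (depth - 1) (buf ++ [c]) out
      else bLoop fuel rest true depth (buf ++ [c]) out

def fix_inside_texttt_alt (content : String) : String :=
  String.ofList (bLoop content.toList.length content.toList false 0 [] [])

-- ===== PRECONDITION & SPEC =====
-- On inputs containing an unterminated texttt block (one whose opening brace is never matched
-- before the end of the string), A silently drops the final character of the input and
-- fabricates a spurious closing brace, while B keeps the block's remaining text (with the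
-- backslash fix applied) and adds nothing; B's is intended because A corrupts the text.
-- closed form: some occurrence of '\texttt{' is followed by a tail none of whose prefixes
-- contains exactly one more '}' than '{' (so the brace opened by the occurrence never closes)
-- guard: does '\texttt{' occur at all? (tail-recursive, cheap on large inputs)
def pvHasTexttt : List Char → Bool
  | [] => false
  | c :: r => if pvPat.isPrefixOf (c :: r) then true else pvHasTexttt r

def D_fix_inside_texttt (content : String) : Prop :=
  pvHasTexttt content.toList = true ∧
  ∃ s < content.toList.length, pvPat <+: content.toList.drop s ∧
    ∀ k ≤ (content.toList.drop (s + 8)).length,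
      ¬ ((content.toList.drop (s + 8)).take k).count '}' =
          ((content.toList.drop (s + 8)).take k).count '{' + 1
instance (content : String) : Decidable (D_fix_inside_texttt content) := by unfold D_fix_inside_texttt; infer_instance

def Spec_fix_inside_texttt (content : String) (out : String) : Prop := ¬ D_fix_inside_texttt content → out = fix_inside_texttt_alt content
instance (content : String) (out : String) : Decidable (Spec_fix_inside_texttt content out) := by unfold Spec_fix_inside_texttt; infer_instance

def pvDiffWitness_fix_inside_texttt : String := "\\texttt{ab"
def pvDiffWitnessOut_fix_inside_texttt : String × String := ("\\texttt{a}", "\\texttt{ab")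

-- ===== CLAIM (what is proved, stated in full; the proofs are below) =====
def Claim_unchanged_fix_inside_texttt : Prop := ∀ (content : String), Dom_fix_inside_texttt content → Spec_fix_inside_texttt content (fix_inside_texttt content)
def Claim_changed_fix_inside_texttt : Prop := Dom_fix_inside_texttt (pvDiffWitness_fix_inside_texttt) ∧ D_fix_inside_texttt (pvDiffWitness_fix_inside_texttt) ∧ fix_inside_texttt (pvDiffWitness_fix_inside_texttt) = pvDiffWitnessOut_fix_inside_texttt.1 ∧ fix_inside_texttt_alt (pvDiffWitness_fix_inside_texttt) = pvDiffWitnessOut_fix_inside_texttt.2 ∧ pvDiffWitnessOut_fix_inside_texttt.1 ≠ pvDiffWitnessOut_fix_inside_texttt.2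

-- ===== LEMMAS AND PROOFS =====

theorem aBrace_zero (cs : List Char) (j : Nat) (bc : Int) : aBrace cs 0 j bc = (j, bc) := rfl
theorem aBrace_succ (cs : List Char) (n j : Nat) (bc : Int) :
    aBrace cs (n + 1) j bc =
      if j < cs.length ∧ 0 < bc then
        aBrace cs n (j + 1)
          (if cs.getD j ' ' = '{' then bc + 1 else if cs.getD j ' ' = '}' then bc - 1 else bc)
      else (j, bc) := rfl

-- proof-side decomposition of bLoop into its two states (outside / inside a block)
mutual
def bScan (l : List Char) : List Char :=
  match l with
  | [] => []
  | c :: rest =>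
    if PySem.Chars.startswith (c :: rest) pvPat then
      pvPat ++ bInside ((c :: rest).drop 8) [] 1
    else
      c :: bScan rest
termination_by l.length
decreasing_by
  all_goals simp

def bInside (l : List Char) (buf : List Char) (depth : Int) : List Char :=
  match l with
  | [] => fixQuad buf
  | c :: rest =>
    if c = '{' then bInside rest (buf ++ [c]) (depth + 1)
    else if c = '}' then
      if depth - 1 = 0 then fixQuad buf ++ ['}'] ++ bScan rest
      else bInside rest (buf ++ [c]) (depth - 1)
    else bInside rest (buf ++ [c]) depth
termination_by l.length
decreasing_by all_goals simp
end

theorem aBrace_bc0 (cs : List Char) (fuel j : Nat) : aBrace cs fuel j 0 = (j, 0) := by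
  cases fuel with
  | zero => rw [aBrace_zero]
  | succ n => rw [aBrace_succ, if_neg (by omega)]

theorem aBrace_fst_ge (cs : List Char) : ∀ (fuel j : Nat) (bc : Int), j ≤ (aBrace cs fuel j bc).1 := by
  intro fuel
  induction fuel with
  | zero => intro j bc; rw [aBrace_zero]
  | succ n ih =>
      intro j bc
      rw [aBrace_succ]
      by_cases h : j < cs.length ∧ 0 < bc
      · rw [if_pos h]
        have := ih (j + 1)
          (if cs.getD j ' ' = '{' then bc + 1 else if cs.getD j ' ' = '}' then bc - 1 else bc)
        omega
      · rw [if_neg h]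

theorem aBrace_fst_le_max (cs : List Char) : ∀ (fuel j : Nat) (bc : Int),
    (aBrace cs fuel j bc).1 ≤ max j cs.length := by
  intro fuel
  induction fuel with
  | zero => intro j bc; rw [aBrace_zero]; simp
  | succ n ih =>
      intro j bc
      rw [aBrace_succ]
      by_cases h : j < cs.length ∧ 0 < bc
      · rw [if_pos h]
        have := ih (j + 1)
          (if cs.getD j ' ' = '{' then bc + 1 else if cs.getD j ' ' = '}' then bc - 1 else bc)
        omega
      · rw [if_neg h]; simp

theorem aBrace_fst_le (cs : List Char) (fuel j : Nat) (bc : Int) (h : j ≤ cs.length) :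
    (aBrace cs fuel j bc).1 ≤ cs.length := by
  have := aBrace_fst_le_max cs fuel j bc
  omega

theorem aBrace_snd0_gt (cs : List Char) : ∀ (fuel j : Nat) (bc : Int),
    0 < bc → (aBrace cs fuel j bc).2 = 0 → j < (aBrace cs fuel j bc).1 := by
  intro fuel
  induction fuel with
  | zero => intro j bc hbc h0; rw [aBrace_zero] at h0; simp at h0; omega
  | succ n ih =>
      intro j bc hbc h0
      rw [aBrace_succ] at h0 ⊢
      by_cases h : j < cs.length ∧ 0 < bc
      · rw [if_pos h] at h0 ⊢
        have := aBrace_fst_ge cs n (j + 1)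
          (if cs.getD j ' ' = '{' then bc + 1 else if cs.getD j ' ' = '}' then bc - 1 else bc)
        omega
      · rw [if_neg h] at h0 ⊢
        simp at h0
        omega

theorem bScan_no_occ (l : List Char) (h : ¬ pvPat <:+: l) : bScan l = l := by
  induction l with
  | nil => rw [bScan]
  | cons c rest ih =>
      rw [bScan]
      rw [if_neg (by rw [PySem.Chars.startswith_iff]; exact fun hp => h hp.isInfix)]
      rw [ih (fun hi => h (List.infix_cons hi))]

theorem bScan_occ (f : Nat) : ∀ (l : List Char), pvPat <+: l.drop f →
    (∀ m < f, ¬ pvPat <+: l.drop m) →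
    bScan l = l.take f ++ pvPat ++ bInside (l.drop (f + 8)) [] 1 := by
  induction f with
  | zero =>
      intro l hp _
      simp only [List.drop_zero] at hp
      match l with
      | [] => exact absurd hp (by simp [pvPat])
      | c :: rest =>
          rw [bScan, if_pos (by rw [PySem.Chars.startswith_iff]; exact hp)]
          simp
  | succ f ih =>
      intro l hp hmin
      match l with
      | [] => exact absurd hp (by simp [pvPat])
      | c :: rest =>
          have h0 : ¬ pvPat <+: (c :: rest) := hmin 0 (by omega)
          rw [bScan, if_neg (by rw [PySem.Chars.startswith_iff]; simpa using h0)]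
          have := ih rest (by simpa using hp) (fun m hm => by
            have := hmin (m + 1) (by omega); simpa using this)
          simp only [List.drop_succ_cons, List.take_succ_cons]
          rw [this]
          simp

-- if some prefix of the tail reaches one more '}' than '{' (offset by the running count),
-- A's inner brace loop terminates with brace_count = 0
theorem aBrace_term : ∀ (fuel : Nat) (cs : List Char) (j : Nat) (bc : Int) (k : Nat),
    cs.length - j ≤ fuel → 0 < bc → j + k ≤ cs.length →
    (((cs.drop j).take k).count '}' : Int) = ((cs.drop j).take k).count '{' + bc →
    (aBrace cs fuel j bc).2 = 0 := by
  intro fuel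
  induction fuel with
  | zero =>
      intro cs j bc k hn hbc hk hcnt
      have hk0 : k = 0 := by omega
      subst hk0
      simp at hcnt
      omega
  | succ n ih =>
      intro cs j bc k hn hbc hk hcnt
      match k with
      | 0 =>
          simp at hcnt
          omega
      | k + 1 =>
          have hj : j < cs.length := by omega
          have hdrop : cs.drop j = cs[j] :: cs.drop (j + 1) := (List.getElem_cons_drop hj).symm
          have hgd : cs.getD j ' ' = cs[j] := List.getD_eq_getElem cs ' ' hj
          rw [hdrop, List.take_succ_cons, List.count_cons, List.count_cons] at hcnt
          rw [aBrace_succ, if_pos (And.intro hj hbc), hgd]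
          by_cases hob : cs[j] = '{'
          · rw [if_pos hob]
            refine ih cs (j + 1) (bc + 1) k (by omega) (by omega) (by omega) ?_
            simp [hob] at hcnt ⊢
            omega
          · rw [if_neg hob]
            by_cases hcb : cs[j] = '}'
            · rw [if_pos hcb]
              by_cases h1 : bc - 1 = 0
              · rw [h1, aBrace_bc0]
              · refine ih cs (j + 1) (bc - 1) k (by omega) (by omega) (by omega) ?_
                simp [hcb] at hcnt ⊢
                omega
            · rw [if_neg hcb]
              refine ih cs (j + 1) bc k (by omega) hbc (by omega) ?_
              simp [hob, hcb] at hcnt ⊢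
              omega

theorem bInside_aBrace : ∀ (fuel : Nat) (cs : List Char) (k : Nat) (buf : List Char) (bc : Int),
    cs.length - k ≤ fuel → k ≤ cs.length → 0 < bc →
    bInside (cs.drop k) buf bc =
      (if (aBrace cs fuel k bc).2 = 0 then
        fixQuad (buf ++ (cs.drop k).take ((aBrace cs fuel k bc).1 - 1 - k)) ++ ['}'] ++
          bScan (cs.drop (aBrace cs fuel k bc).1)
      else fixQuad (buf ++ cs.drop k)) := by
  intro fuel
  induction fuel with
  | zero =>
      intro cs k buf bc hn hk hbc
      have hke : k = cs.length := by omega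
      subst hke
      rw [List.drop_length, aBrace_zero]
      rw [if_neg (show ¬((cs.length, bc).2 = 0) by simp only; omega)]
      rw [bInside]
      simp
  | succ n ih =>
      intro cs k buf bc hn hk hbc
      by_cases hkl : k < cs.length
      · have hdrop : cs.drop k = cs[k] :: cs.drop (k + 1) := (List.getElem_cons_drop hkl).symm
        have hgd : cs.getD k ' ' = cs[k] := List.getD_eq_getElem cs ' ' hkl
        rw [aBrace_succ, if_pos (And.intro hkl hbc), hgd, hdrop, bInside]
        by_cases hob : cs[k] = '{'
        · rw [if_pos hob, if_pos hob]
          rw [ih cs (k + 1) (buf ++ [cs[k]]) (bc + 1) (by omega) (by omega) (by omega)]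
          by_cases hz : (aBrace cs n (k + 1) (bc + 1)).2 = 0
          · rw [if_pos hz, if_pos hz]
            have hgt : k + 1 < (aBrace cs n (k + 1) (bc + 1)).1 :=
              aBrace_snd0_gt cs n (k + 1) (bc + 1) (by omega) hz
            have harith : (aBrace cs n (k+1) (bc+1)).1 - 1 - k = ((aBrace cs n (k+1) (bc+1)).1 - 1 - (k+1)) + 1 := by
              omega
            rw [harith, List.take_succ_cons]
            simp
          · rw [if_neg hz, if_neg hz]
            simp
        · rw [if_neg hob, if_neg hob]
          by_cases hcb : cs[k] = '}'
          · rw [if_pos hcb, if_pos hcb]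
            by_cases h1 : bc - 1 = 0
            · rw [if_pos h1]
              rw [show bc - 1 = 0 from h1, aBrace_bc0]
              rw [if_pos (by simp only)]
              simp
            · rw [if_neg h1]
              rw [ih cs (k + 1) (buf ++ [cs[k]]) (bc - 1) (by omega) (by omega) (by omega)]
              by_cases hz : (aBrace cs n (k + 1) (bc - 1)).2 = 0
              · rw [if_pos hz, if_pos hz]
                have hgt : k + 1 < (aBrace cs n (k + 1) (bc - 1)).1 :=
                  aBrace_snd0_gt cs n (k + 1) (bc - 1) (by omega) hz
                have harith : (aBrace cs n (k+1) (bc-1)).1 - 1 - k = ((aBrace cs n (k+1) (bc-1)).1 - 1 - (k+1)) + 1 := by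
                  omega
                rw [harith, List.take_succ_cons]
                simp [hcb]
              · rw [if_neg hz, if_neg hz]
                simp [hcb]
          · rw [if_neg hcb, if_neg hcb]
            rw [ih cs (k + 1) (buf ++ [cs[k]]) bc (by omega) (by omega) hbc]
            by_cases hz : (aBrace cs n (k + 1) bc).2 = 0
            · rw [if_pos hz, if_pos hz]
              have hgt : k + 1 < (aBrace cs n (k + 1) bc).1 :=
                aBrace_snd0_gt cs n (k + 1) bc hbc hz
              have harith : (aBrace cs n (k+1) bc).1 - 1 - k = ((aBrace cs n (k+1) bc).1 - 1 - (k+1)) + 1 := by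
                omega
              rw [harith, List.take_succ_cons]
              simp
            · rw [if_neg hz, if_neg hz]
              simp
      · have hke : k = cs.length := by omega
        subst hke
        rw [List.drop_length, aBrace_succ]
        rw [if_neg (show ¬(cs.length < cs.length ∧ 0 < bc) by omega)]
        rw [if_neg (show ¬((cs.length, bc).2 = 0) by simp only; omega)]
        rw [bInside]
        simp

theorem take_prefix_drop (l p : List Char) (f : Nat) (hp : p <+: l.drop f) :
    l.take (f + p.length) = l.take f ++ p := by
  obtain ⟨t, ht⟩ := hp
  rw [List.take_add, ← ht]
  simp

theorem bLoop_split : ∀ (fuel : Nat) (l : List Char), l.length ≤ fuel →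
    ∀ (inside : Bool) (depth : Int) (buf out : List Char),
    bLoop fuel l inside depth buf out =
      out ++ (if inside then bInside l buf depth else bScan l) := by
  intro fuel
  induction fuel with
  | zero =>
      intro l hl inside depth buf out
      have : l = [] := List.eq_nil_of_length_eq_zero (by omega)
      subst this
      rw [bLoop, bScan, bInside]
      cases inside <;> simp
  | succ n ih =>
      intro l hl inside depth buf out
      match l with
      | [] =>
          rw [bLoop, bScan, bInside]
          cases inside <;> simp
      | c :: rest =>
          rw [bLoop, bScan, bInside]
          cases inside with
          | false =>
              simp only
              by_cases hsw : PySem.Chars.startswith (c :: rest) pvPat = true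
              · rw [if_pos hsw, if_pos hsw,
                    ih ((c :: rest).drop 8) (by simp at hl ⊢; omega) true 1 [] (out ++ pvPat)]
                simp
              · rw [if_neg hsw, if_neg hsw,
                    ih rest (by simp at hl; omega) false depth buf (out ++ [c])]
                simp
          | true =>
              rw [if_neg (by simp)]
              by_cases hob : c = '{'
              · rw [if_pos hob, if_pos hob,
                    ih rest (by simp at hl; omega) true (depth + 1) (buf ++ [c]) out]
                simp
              · rw [if_neg hob, if_neg hob]
                by_cases hcb : c = '}'
                · rw [if_pos hcb, if_pos hcb]
                  by_cases h1 : depth - 1 = 0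
                  · rw [if_pos h1, if_pos h1,
                        ih rest (by simp at hl; omega) false (depth - 1) buf (out ++ fixQuad buf ++ ['}'])]
                    simp
                  · rw [if_neg h1, if_neg h1,
                        ih rest (by simp at hl; omega) true (depth - 1) (buf ++ [c]) out]
                    simp
                · rw [if_neg hcb, if_neg hcb,
                      ih rest (by simp at hl; omega) true depth (buf ++ [c]) out]
                  simp

theorem aLoop_eq_bScan : ∀ (fuel : Nat) (cs : List Char) (i : Nat), cs.length - i ≤ fuel →
    (∀ s : Nat, pvPat <+: cs.drop s →
      ∃ k ≤ (cs.drop (s + 8)).length,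
        ((cs.drop (s + 8)).take k).count '}' = ((cs.drop (s + 8)).take k).count '{' + 1) →
    aLoop cs fuel i = bScan (cs.drop i) := by
  intro fuel
  induction fuel with
  | zero =>
      intro cs i hn hU
      rw [aLoop, List.drop_eq_nil_of_le (by omega), bScan]
  | succ n ih =>
      intro cs i hn hU
      by_cases hi : i < cs.length
      · rw [aLoop, if_pos hi]
        by_cases hs : PySem.Chars.findFrom cs pvPat (i : Int) none = -1
        · rw [if_pos hs]
          have hno : ¬ pvPat <:+: cs.drop i :=
            (PySem.Chars.findFrom_natCast_eq_neg_one_iff cs pvPat i (le_of_lt hi)).mp hs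
          rw [bScan_no_occ _ hno, PySem.List.slice_from_natCast]
        · rw [if_neg hs]
          obtain ⟨hge, hpref, hmin⟩ :=
            PySem.Chars.findFrom_natCast_spec cs pvPat i (le_of_lt hi) hs
          set st := PySem.Chars.findFrom cs pvPat (i : Int) none with hstdef
          set s := st.toNat with hsdef
          have hsi : i ≤ s := by omega
          have hst : st = (s : Int) := by omega
          have hplen : pvPat.length = 8 := by decide
          have hpref' : pvPat <+: (cs.drop i).drop (s - i) := by
            rw [List.drop_drop]
            have : i + (s - i) = s := by omega
            rw [this]; exact hpref
          have hmin' : ∀ m < s - i, ¬ pvPat <+: (cs.drop i).drop m := by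
            intro m hm
            rw [List.drop_drop]
            exact hmin (i + m) (by omega) (by omega)
          have hB := bScan_occ (s - i) (cs.drop i) hpref' hmin'
          rw [hB]
          -- block bounds
          have hs8 : s + 8 ≤ cs.length := by
            have := hpref.length_le
            simp [hplen] at this
            omega
          have hj := aBrace_fst_ge cs cs.length (s + 8) 1
          have hjle := aBrace_fst_le cs cs.length (s + 8) 1 hs8
          set j := (aBrace cs cs.length (s + 8) 1).1 with hjdef
          have hdd : (cs.drop i).drop (s - i + 8) = cs.drop (s + 8) := by
            rw [List.drop_drop]; congr 1; omega
          -- the block terminates: its tail reaches one extra '}' by hypothesis hU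
          obtain ⟨k, hkle, hcnt⟩ := hU s hpref
          have hz : (aBrace cs cs.length (s + 8) 1).2 = 0 := by
            refine aBrace_term cs.length cs (s + 8) 1 k (by omega) one_pos
              (by rw [List.length_drop] at hkle; omega) ?_
            omega
          · -- A's first slice = take ((s-i)+8) of the suffix = take (s-i) ++ pat
            have hs1 : PySem.List.slice cs (some (i : Int)) (some ((s : Int) + 8)) =
                (cs.drop i).take (s - i) ++ pvPat := by
              rw [PySem.List.slice_toNat cs (by omega) (by omega)]
              have h1 : ((s : Int) + 8).toNat = s + 8 := by omega
              have h2 : (i : Int).toNat = i := by omega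
              rw [h1, h2]
              have : s + 8 - i = (s - i) + 8 := by omega
              rw [this, ← hplen, take_prefix_drop _ _ _ hpref']
            have hs2 : PySem.List.slice cs (some ((s : Int) + 8)) (some ((j : Int) - 1)) =
                (cs.drop (s + 8)).take (j - 1 - (s + 8)) := by
              rw [PySem.List.slice_toNat cs (by omega) (by omega)]
              have h1 : ((s : Int) + 8).toNat = s + 8 := by omega
              have h2 : ((j : Int) - 1).toNat = j - 1 := by omega
              rw [h1, h2]
            rw [hs1, hs2, hdd]
            rw [bInside_aBrace cs.length cs (s + 8) [] 1 (by omega) hs8 (by omega)]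
            rw [← hjdef, if_pos hz]
            rw [← ih cs j (by omega) hU]
            simp [List.append_assoc]
      · rw [aLoop, if_neg (by omega), List.drop_eq_nil_of_le (by omega), bScan]

theorem pvHasTexttt_of_prefix_drop : ∀ (l : List Char) (s : Nat), pvPat <+: l.drop s →
    pvHasTexttt l = true := by
  intro l
  induction l with
  | nil =>
      intro s hp
      rw [List.drop_nil] at hp
      exact absurd (List.prefix_nil.mp hp) (by decide)
  | cons c rest ih =>
      intro s hp
      rw [pvHasTexttt]
      by_cases hpre : pvPat.isPrefixOf (c :: rest) = true
      · rw [if_pos hpre]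
      · rw [if_neg hpre]
        match s with
        | 0 =>
            exact absurd ((List.isPrefixOf_iff_prefix).mpr (by simpa using hp)) hpre
        | s + 1 =>
            exact ih s (by simpa using hp)

-- ===== VERDICT (by name: the statement is the Claim_ definition above) =====
theorem fix_inside_texttt_spec : Claim_unchanged_fix_inside_texttt := by
  intro content _ hnd
  unfold D_fix_inside_texttt at hnd
  push_neg at hnd
  have hU : ∀ s : Nat, pvPat <+: content.toList.drop s →
      ∃ k ≤ (content.toList.drop (s + 8)).length,
        ((content.toList.drop (s + 8)).take k).count '}' =
          ((content.toList.drop (s + 8)).take k).count '{' + 1 := by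
    intro s hp
    have hlen : pvPat.length = 8 := by decide
    have hsl : s < content.toList.length := by
      have := hp.length_le
      rw [hlen, List.length_drop] at this
      omega
    exact hnd (pvHasTexttt_of_prefix_drop content.toList s hp) s hsl hp
  unfold fix_inside_texttt fix_inside_texttt_alt
  rw [aLoop_eq_bScan (content.toList.length + 1) content.toList 0 (by omega) hU]
  rw [bLoop_split content.toList.length content.toList (by omega) false 0 [] []]
  simp

theorem fix_inside_texttt_changed : Claim_changed_fix_inside_texttt := by
  unfold Claim_changed_fix_inside_texttt; decide
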